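-- pv_equiv track=rewrite | github.com/mohantyk/bioinformatics | week12.py | de_bruijn_graph
-- ===== SOURCE A (Python) =====
-- from collections import defaultdict, deque, Counter
--
-- def de_bruijn_graph(dna, k):
--     adjacency = defaultdict(list)
--     prev = None
--     n = len(dna)
--     for i in range(n-(k-1)+1):
--         kmer = dna[i:i+k-1]
--         if prev is not None:
--             adjacency[prev].append(kmer)
--         prev = kmer
--     return adjacency
-- ===== SOURCE B (Python) =====
-- from collections import defaultdict
--
-- def de_bruijn_graph(dna, k):
--     # staged group-by: list the (k-1)-mer nodes, take the distinct source nodes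
--     # in first-occurrence order, and collect each one's successors by a scan
--     nodes = [dna[i:i+k-1] for i in range(len(dna)-k+2)]
--     adjacency = defaultdict(list)
--     for key in dict.fromkeys(nodes[:-1]):
--         adjacency[key] = [v for u, v in zip(nodes, nodes[1:]) if u == key]
--     return adjacency
-- ===== Notes on version B (the rewrite author's own statement) =====
-- stated objective: alternative
-- what changed: B replaces A's incremental prev-tracking dict build by a staged group-by: it lists the (k-1)-mer nodes, deduplicates the source nodes in first-occurrence order, and for each distinct key collects all of its successors with a scan over the consecutive pairs.
import Mathlib
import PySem

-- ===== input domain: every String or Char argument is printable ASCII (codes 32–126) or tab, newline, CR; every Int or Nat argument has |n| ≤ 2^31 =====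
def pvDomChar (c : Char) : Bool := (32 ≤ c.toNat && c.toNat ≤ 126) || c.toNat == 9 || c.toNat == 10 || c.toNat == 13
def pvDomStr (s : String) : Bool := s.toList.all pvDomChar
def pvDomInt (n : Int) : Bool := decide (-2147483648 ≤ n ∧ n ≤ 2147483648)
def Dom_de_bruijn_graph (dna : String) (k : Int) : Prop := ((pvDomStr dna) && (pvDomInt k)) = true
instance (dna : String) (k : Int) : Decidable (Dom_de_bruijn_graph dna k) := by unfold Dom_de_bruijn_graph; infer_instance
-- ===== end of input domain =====

-- B replaces A's incremental prev-tracking dict build by a staged group-by: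
-- distinct source nodes in first-occurrence order, successors collected per key by a scan
-- (alternative decomposition; same return value).

-- ===== PORT A =====
-- loop body of A: kmer = dna[i:i+k-1]; if prev is not None: adjacency[prev].append(kmer); prev = kmer
def pvStepA (dna : String) (k : Int)
    (st : PySem.Dict String (List String) × Option String) (i : Int) :
    PySem.Dict String (List String) × Option String :=
  let kmer := PySem.Str.slice dna (some i) (some (i + (k - 1)))
  match st.2 with
  | some prev => (st.1.modify prev [] (· ++ [kmer]), some kmer)
  | none => (st.1, some kmer)

def de_bruijn_graph (dna : String) (k : Int) : List (String × List String) :=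
  let n : Int := PySem.Str.len dna
  ((PySem.List.pyRange 0 (n - (k - 1) + 1) 1).foldl (pvStepA dna k)
    (PySem.Dict.empty, none)).1.items

-- ===== PORT B =====
def de_bruijn_graph_alt (dna : String) (k : Int) : List (String × List String) :=
  -- nodes = [dna[i:i+k-1] for i in range(len(dna)-k+2)]
  let nodes := (PySem.List.pyRange 0 (PySem.Str.len dna - k + 2) 1).map
    (fun i => PySem.Str.slice dna (some i) (some (i + (k - 1))))
  -- for key in dict.fromkeys(nodes[:-1]): adjacency[key] = [v for u, v in zip(nodes, nodes[1:]) if u == key]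
  ((PySem.List.dedup (PySem.List.slice nodes none (some (-1)))).foldl
    (fun d key => d.insert key
      (((List.zip nodes (nodes.drop 1)).filter (fun p => p.1 == key)).map (·.2)))
    PySem.Dict.empty).items

-- ===== PRECONDITION & SPEC =====
def Spec_de_bruijn_graph (dna : String) (k : Int) (out : List (String × List String)) : Prop := out = de_bruijn_graph_alt dna k
instance (dna : String) (k : Int) (out : List (String × List String)) : Decidable (Spec_de_bruijn_graph dna k out) := by unfold Spec_de_bruijn_graph; infer_instance

-- ===== CLAIM (what is proved, stated in full; the proofs are below) =====
def Claim_equal_de_bruijn_graph : Prop := ∀ (dna : String) (k : Int), Dom_de_bruijn_graph dna k → Spec_de_bruijn_graph dna k (de_bruijn_graph dna k)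

-- ===== LEMMAS AND PROOFS =====

-- A's loop body as a function of the kmer itself
def pvStepA' (st : PySem.Dict String (List String) × Option String) (kmer : String) :
    PySem.Dict String (List String) × Option String :=
  match st.2 with
  | some prev => (st.1.modify prev [] (· ++ [kmer]), some kmer)
  | none => (st.1, some kmer)

-- the modify-append step over one edge
def pvStepE (adj : PySem.Dict String (List String)) (uv : String × String) :
    PySem.Dict String (List String) :=
  adj.modify uv.1 [] (· ++ [uv.2])

-- once prev = some p, A's fold over the remaining nodes is the edge fold over zip (p::ns) ns
theorem pvFold_eq (ns : List String) (adj : PySem.Dict String (List String)) (p : String) :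
    (ns.foldl pvStepA' (adj, some p)).1 = (List.zip (p :: ns) ns).foldl pvStepE adj := by
  induction ns generalizing adj p with
  | nil => rfl
  | cons q ns ih =>
      simp only [List.foldl_cons, List.zip_cons_cons]
      exact ih (pvStepE adj (p, q)) q

-- A's dict is the edge fold over zip nodes (nodes.drop 1)
theorem pvA_dict (nodes : List String) :
    (nodes.foldl pvStepA' (PySem.Dict.empty, none)).1
      = (List.zip nodes (nodes.drop 1)).foldl pvStepE PySem.Dict.empty := by
  cases nodes with
  | nil => rfl
  | cons q ns =>
      simp only [List.foldl_cons, List.drop_succ_cons, List.drop_zero]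
      exact pvFold_eq ns PySem.Dict.empty q

theorem pvMap_fst_zip_drop (ns : List String) :
    (List.zip ns (ns.drop 1)).map Prod.fst = ns.dropLast := by
  induction ns with
  | nil => rfl
  | cons a ns ih =>
      cases ns with
      | nil => rfl
      | cons b ns =>
          simp only [List.drop_succ_cons, List.drop_zero, List.zip_cons_cons, List.map_cons,
            List.dropLast_cons₂]
          simpa using ih

theorem de_bruijn_graph_spec : Claim_equal_de_bruijn_graph := by
  intro dna k _
  unfold Spec_de_bruijn_graph de_bruijn_graph de_bruijn_graph_alt
  dsimp only
  have hb : PySem.Str.len dna - (k - 1) + 1 = PySem.Str.len dna - k + 2 := by ring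
  rw [hb]
  set nodes := (PySem.List.pyRange 0 (PySem.Str.len dna - k + 2) 1).map
    (fun i => PySem.Str.slice dna (some i) (some (i + (k - 1)))) with hnodes
  have hmap :
      (PySem.List.pyRange 0 (PySem.Str.len dna - k + 2) 1).foldl (pvStepA dna k)
          (PySem.Dict.empty, none)
        = nodes.foldl pvStepA' (PySem.Dict.empty, none) := by
    rw [hnodes, List.foldl_map]; rfl
  rw [hmap, pvA_dict]
  set edges := List.zip nodes (nodes.drop 1) with hedges
  set dA := edges.foldl pvStepE PySem.Dict.empty with hdA
  -- keys of A's dict: first-occurrence dedup of the edge sources = dedup nodes[:-1]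
  have hkeys : dA.keys = PySem.List.dedup (PySem.List.slice nodes none (some (-1))) := by
    rw [hdA]
    have := PySem.Dict.keys_foldl_modify_key (l := edges) (key := Prod.fst)
      (d0 := ([] : List String)) (f := fun _ uv => (· ++ [uv.2])) (d := PySem.Dict.empty)
    rw [show (fun (d : PySem.Dict String (List String)) (uv : String × String) =>
          d.modify uv.1 [] (· ++ [uv.2])) = pvStepE from rfl] at this
    rw [this]
    rw [PySem.List.slice_to_neg_one, pvMap_fst_zip_drop]
    simp [PySem.Dict.keys_empty, PySem.Set.update_nil_left, PySem.List.dedup_eq_ofList]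
  have hnodup : dA.keys.Nodup := by
    rw [hkeys]; exact PySem.List.nodup_dedup _
  -- A's items as a map over its keys, with each key's grouped successor list
  have hitemsA : dA.items = dA.keys.map (fun c => (c, dA.getD c [])) := by
    exact PySem.Dict.items_eq_map_keys dA hnodup []
  have hval : ∀ c, dA.getD c [] = ((edges.filter (fun p => p.1 == c)).map (·.2)) := by
    intro c
    rw [hdA]
    have := PySem.Dict.getD_foldl_modify_append (l := edges) (d := PySem.Dict.empty) (c := c)
    rw [show (fun (d : PySem.Dict String (List String)) (p : String × String) =>
          d.modify p.1 [] (· ++ [p.2])) = pvStepE from rfl] at this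
    rw [this]; simp [PySem.Dict.getD_empty]
  -- B's dict: fresh distinct keys, so items append in key order
  have hitemsB :
      (((PySem.List.dedup (PySem.List.slice nodes none (some (-1))))).foldl
        (fun d key => d.insert key ((edges.filter (fun p => p.1 == key)).map (·.2)))
        PySem.Dict.empty).items
      = (PySem.List.dedup (PySem.List.slice nodes none (some (-1)))).map
          (fun c => (c, (edges.filter (fun p => p.1 == c)).map (·.2))) := by
    have := PySem.Dict.items_foldl_insert_fresh
      (l := PySem.List.dedup (PySem.List.slice nodes none (some (-1))))
      (k := fun c => c)
      (v := fun c => (edges.filter (fun p => p.1 == c)).map (·.2))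
      (d := PySem.Dict.empty)
      (by intro a _; simp [PySem.Dict.contains_empty])
      (by simp)
    simpa using this
  rw [hitemsB, hitemsA, hkeys]
  exact List.map_congr_left (fun c _ => by rw [hval c])
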